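-- pv_equiv track=rewrite | github.com/BrainStorming-2021/BrainStorming | ParkJeongmi/k_num.py | solution
-- ===== SOURCE A (Python) =====
-- def solution(array, commands):
--     answer = []*len(commands)
--     for com_list in commands:
--         res=[]*(com_list[1]-com_list[0]+1)
--         if com_list:
--             res=array[com_list[0]-1:com_list[1]]
--             res.sort()
--             answer.append(res[com_list[2]-1])
--     else:
--         return answer
-- ===== SOURCE B (Python) =====
-- import heapq
--
-- def solution(array, commands):
--     return [heapq.nsmallest(c[2], array[c[0]-1:c[1]])[-1] for c in commands]
-- ===== Notes on version B (the rewrite author's own statement) =====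
-- stated objective: alternative
-- what changed: Replaces the loop that slices, fully sorts each slice in place and indexes k-1 with a comprehension using heapq.nsmallest(k, slice)[-1], a partial heap selection of the k smallest elements instead of a full comparison sort.
-- outside the precondition, e.g. on solution([5, 1, 3], [[1, 3, 0]]): A returns [5], B raises IndexError
import Mathlib
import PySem

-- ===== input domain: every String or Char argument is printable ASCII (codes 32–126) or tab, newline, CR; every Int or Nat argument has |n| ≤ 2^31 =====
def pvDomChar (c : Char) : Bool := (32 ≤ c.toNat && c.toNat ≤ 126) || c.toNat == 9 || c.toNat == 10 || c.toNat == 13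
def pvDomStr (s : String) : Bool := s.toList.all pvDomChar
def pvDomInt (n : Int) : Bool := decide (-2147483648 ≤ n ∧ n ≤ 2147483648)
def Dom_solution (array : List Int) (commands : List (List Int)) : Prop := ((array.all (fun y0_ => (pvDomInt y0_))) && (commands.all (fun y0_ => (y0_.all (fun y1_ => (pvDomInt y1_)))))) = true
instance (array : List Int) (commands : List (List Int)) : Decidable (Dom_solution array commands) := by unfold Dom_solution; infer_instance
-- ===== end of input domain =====

-- B replaces the slice/full-sort/index loop by a comprehension with partial heap
-- selection (heapq.nsmallest(k, slice)[-1]); same return value on Pre_solution.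


-- ===== PORT A =====
-- one iteration of A's for-loop: index com_list[0..2], slice, in-place sort, append res[k-1]
def solutionStepA (array : List Int) (answer : List Int) (com : List Int) : List Int :=
  match PySem.List.pyGet? com 1, PySem.List.pyGet? com 0 with
  | some j, some i =>      -- com_list[1], com_list[0] evaluated first (the dead []*(…) expression)
    if com.isEmpty then answer
    else
      match PySem.List.pyGet? com 2 with
      | some k =>
        let res := PySem.List.sorted (PySem.List.slice array (some (i - 1)) (some j)) (fun x => x) false
        match PySem.List.pyGet? res (k - 1) with
        | some v => answer ++ [v]
        | none => answer   -- IndexError: outside Pre_solution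
      | none => answer     -- IndexError: outside Pre_solution
  | _, _ => answer         -- IndexError: outside Pre_solution

def solution (array : List Int) (commands : List (List Int)) : List Int :=
  commands.foldl (solutionStepA array) []

-- ===== PORT B =====
-- heapq.nsmallest(n, xs) for ints = sorted(xs)[:n] (documented contract of the library call)
def nsmallestInt (n : Int) (xs : List Int) : List Int :=
  (PySem.List.sorted xs (fun x => x) false).take n.toNat

-- one comprehension element: heapq.nsmallest(c[2], array[c[0]-1:c[1]])[-1]
def solutionElemB (array : List Int) (c : List Int) : Int :=
  (PySem.List.pyGet?
     (nsmallestInt (PySem.List.pyGetD c 2 0)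
        (PySem.List.slice array (some (PySem.List.pyGetD c 0 0 - 1)) (some (PySem.List.pyGetD c 1 0))))
     (-1)).getD 0   -- the .getD 0 totalises the IndexError case, which Pre_solution excludes

def solution_alt (array : List Int) (commands : List (List Int)) : List Int :=
  commands.map (solutionElemB array)

-- ===== PRECONDITION & SPEC =====
-- Pre_ excludes commands shorter than 3 entries (A raises IndexError) and commands whose k = c[2]
-- lies outside 1..len(slice): there A either raises, or for -len(slice) ≤ k-1 < 0 returns a value by
-- Python's negative-index wraparound, where B's heap selection itself raises IndexError.
def Pre_solution (array : List Int) (commands : List (List Int)) : Prop :=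
  ∀ c ∈ commands, 3 ≤ c.length ∧ 1 ≤ c.getD 2 0 ∧
    c.getD 2 0 ≤ (PySem.List.slice array (some (c.getD 0 0 - 1)) (some (c.getD 1 0))).length
instance (array : List Int) (commands : List (List Int)) : Decidable (Pre_solution array commands) := by
  unfold Pre_solution; infer_instance

def pvWitness_solution : List Int × List (List Int) := ([5, 1, 3, 2], [[1, 3, 2], [2, 4, 1]])

def Spec_solution (array : List Int) (commands : List (List Int)) (out : List Int) : Prop := out = solution_alt array commands
instance (array : List Int) (commands : List (List Int)) (out : List Int) : Decidable (Spec_solution array commands out) := by unfold Spec_solution; infer_instance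

-- ===== CLAIM (what is proved, stated in full; the proofs are below) =====
def Claim_equal_solution : Prop := ∀ (array : List Int) (commands : List (List Int)), Dom_solution array commands → Pre_solution array commands → Spec_solution array commands (solution array commands)

-- ===== LEMMAS AND PROOFS =====

-- pointwise: on a command admitted by Pre_, A's loop body appends exactly B's comprehension element
lemma stepA_eq (array : List Int) (answer : List Int) (c : List Int)
    (hlen : 3 ≤ c.length) (hk1 : 1 ≤ c.getD 2 0)
    (hk2 : c.getD 2 0 ≤ (PySem.List.slice array (some (c.getD 0 0 - 1)) (some (c.getD 1 0))).length) :
    solutionStepA array answer c = answer ++ [solutionElemB array c] := by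
  obtain ⟨i, j, k, rest, rfl⟩ : ∃ i j k rest, c = i :: j :: k :: rest := by
    match c, hlen with | i :: j :: k :: rest, _ => exact ⟨i, j, k, rest, rfl⟩
  simp only [List.getD_cons_zero, List.getD_cons_succ] at hk1 hk2
  have h0 : PySem.List.pyGet? (i :: j :: k :: rest) 0 = some i :=
    PySem.List.pyGet?_zero_cons i (j :: k :: rest)
  have h1 : PySem.List.pyGet? (i :: j :: k :: rest) 1 = some j := by
    rw [PySem.List.pyGet?_of_nonneg _ (by norm_num : (0 : Int) ≤ 1)]; rfl
  have h2 : PySem.List.pyGet? (i :: j :: k :: rest) 2 = some k := by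
    rw [PySem.List.pyGet?_of_nonneg _ (by norm_num : (0 : Int) ≤ 2)]; rfl
  simp only [solutionStepA, solutionElemB, nsmallestInt, PySem.List.pyGetD, h0, h1, h2,
    Option.getD_some, List.isEmpty_cons, Bool.false_eq_true, if_false]
  generalize hs : PySem.List.sorted (PySem.List.slice array (some (i - 1)) (some j))
      (fun x => x) false = s
  have hLen : s.length = (PySem.List.slice array (some (i - 1)) (some j)).length := by
    rw [← hs]; exact PySem.List.length_sorted _ _ _
  have hkL : k ≤ (s.length : Int) := by rw [hLen]; exact_mod_cast hk2
  have hidx : (k - 1).toNat < s.length := by omega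
  have hA : PySem.List.pyGet? s (k - 1) = some s[(k - 1).toNat] := by
    rw [PySem.List.pyGet?_of_nonneg _ (by omega : (0 : Int) ≤ k - 1)]
    exact List.getElem?_eq_getElem hidx
  have hB : PySem.List.pyGet? (s.take k.toNat) (-1) = some s[(k - 1).toNat] := by
    rw [PySem.List.pyGet?_neg_one, List.getLast?_eq_getElem?]
    have hl : (s.take k.toNat).length = k.toNat := by
      simp only [List.length_take]; omega
    rw [hl]
    have ht : (s.take k.toNat)[k.toNat - 1]? = s[k.toNat - 1]? :=
      List.getElem?_take_of_lt (by omega)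
    have he : k.toNat - 1 = (k - 1).toNat := by omega
    rw [ht, he]
    exact List.getElem?_eq_getElem hidx
  rw [hA, hB]
  simp

lemma fold_eq (array : List Int) (commands : List (List Int)) :
    ∀ answer : List Int,
    (∀ c ∈ commands, 3 ≤ c.length ∧ 1 ≤ c.getD 2 0 ∧
      c.getD 2 0 ≤ (PySem.List.slice array (some (c.getD 0 0 - 1)) (some (c.getD 1 0))).length) →
    commands.foldl (solutionStepA array) answer = answer ++ commands.map (solutionElemB array) := by
  induction commands with
  | nil => intro answer _; simp
  | cons c cs ih =>
    intro answer h
    obtain ⟨h1, h2, h3⟩ := h c (List.mem_cons_self ..)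
    simp only [List.foldl_cons, List.map_cons]
    rw [stepA_eq array answer c h1 h2 h3, ih _ (fun d hd => h d (List.mem_cons_of_mem _ hd))]
    simp

theorem solution_spec : Claim_equal_solution := by
  intro array commands _ hpre
  unfold Spec_solution solution solution_alt
  rw [fold_eq array commands [] hpre]
  simp
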